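-- pv_equiv track=rewrite | github.com/mch-sg/dtu-public | 1-semester/02002-programming/psets/2025_12_exam/graph_transpose.py | graph_transpose
-- ===== SOURCE A (Python) =====
-- def graph_transpose(graph: dict) -> dict:
--     transposed = {}
--     for node, edges in graph.items():
--         for k in range(len(edges)):
--             if edges[k] not in transposed:
--                 transposed[edges[k]] = []
--
--             transposed[edges[k]].append(node)
--
--     return transposed
-- ===== SOURCE B (Python) =====
-- def graph_transpose(graph: dict) -> dict:
--     dests = []
--     for edges in graph.values():
--         for e in edges:
--             if e not in dests:
--                 dests.append(e)
--     return {d: [node for node, edges in graph.items() for e in edges if e == d]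
--             for d in dests}
-- ===== Notes on version B (the rewrite author's own statement) =====
-- stated objective: alternative
-- what changed: B first collects the distinct destinations in first-appearance order, then builds the result as a dict comprehension that, per destination, rescans all edges for matching sources, instead of A's single edge pass that mutates/extends the dict in place.
import Mathlib
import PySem

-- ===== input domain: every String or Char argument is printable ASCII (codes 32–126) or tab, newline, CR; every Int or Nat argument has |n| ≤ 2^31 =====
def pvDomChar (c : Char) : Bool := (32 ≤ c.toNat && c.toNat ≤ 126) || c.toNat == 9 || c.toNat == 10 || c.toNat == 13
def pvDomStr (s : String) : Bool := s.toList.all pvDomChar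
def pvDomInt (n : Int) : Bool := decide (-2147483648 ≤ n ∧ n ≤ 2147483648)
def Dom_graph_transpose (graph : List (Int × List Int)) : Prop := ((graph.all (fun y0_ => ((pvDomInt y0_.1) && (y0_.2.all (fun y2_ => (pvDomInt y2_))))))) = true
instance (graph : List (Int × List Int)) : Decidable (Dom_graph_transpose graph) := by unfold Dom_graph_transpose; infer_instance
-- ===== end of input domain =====

-- B inverts the nesting: it first collects the distinct destinations in first-appearance
-- order, then builds the result per destination by rescanning all edges (objective: alternative).

-- ===== PORT A =====
-- single edge pass: for each node, for each index k, ensure key edges[k] exists, append node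
def graph_transpose (graph : List (Int × List Int)) : List (Int × List Int) :=
  (graph.foldl
    (fun transposed p =>
      (PySem.List.pyRange 0 (p.2.length : Int) 1).foldl
        (fun t k =>
          (if t.contains (PySem.List.pyGetD p.2 k 0) then t
           else t.insert (PySem.List.pyGetD p.2 k 0) ([] : List Int)).modify
            (PySem.List.pyGetD p.2 k 0) [] (fun l => l ++ [p.1]))
        transposed)
    (PySem.Dict.empty : PySem.Dict Int (List Int))).items

-- ===== PORT B =====
-- distinct destinations, in first-appearance order over graph.values()
def pvDests (graph : List (Int × List Int)) : List Int :=
  graph.foldl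
    (fun dests p =>
      p.2.foldl (fun ds e => if ds.contains e then ds else ds ++ [e]) dests) []

-- [node for node, edges in graph.items() for e in edges if e == d]
def pvCollect (graph : List (Int × List Int)) (d : Int) : List Int :=
  graph.flatMap (fun p => (p.2.filter (fun e => e == d)).map (fun _ => p.1))

def graph_transpose_alt (graph : List (Int × List Int)) : List (Int × List Int) :=
  (pvDests graph).map (fun d => (d, pvCollect graph d))

-- ===== PRECONDITION & SPEC =====
def Spec_graph_transpose (graph : List (Int × List Int)) (out : List (Int × List Int)) : Prop := out = graph_transpose_alt graph
instance (graph : List (Int × List Int)) (out : List (Int × List Int)) : Decidable (Spec_graph_transpose graph out) := by unfold Spec_graph_transpose; infer_instance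

-- ===== CLAIM (what is proved, stated in full; the proofs are below) =====
def Claim_equal_graph_transpose : Prop := ∀ (graph : List (Int × List Int)), Dom_graph_transpose graph → Spec_graph_transpose graph (graph_transpose graph)

-- ===== LEMMAS AND PROOFS =====

-- the edge list as (destination, source) pairs, in A's traversal order
def pvPairs (graph : List (Int × List Int)) : List (Int × Int) :=
  graph.flatMap (fun p => p.2.map (fun e => (e, p.1)))

theorem pv_inner_step (t : PySem.Dict Int (List Int)) (e : Int) (n : Int) :
    (if t.contains e then t else t.insert e ([] : List Int)).modify e [] (fun l => l ++ [n])
      = t.modify e [] (fun l => l ++ [n]) := by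
  by_cases h : t.contains e = true
  · simp [h]
  · simp only [h, Bool.false_eq_true, not_false_eq_true, if_neg]
    show (t.insert e []).insert e (((t.insert e []).getD e []) ++ [n])
        = t.insert e ((t.getD e []) ++ [n])
    rw [PySem.Dict.getD_insert_self, PySem.Dict.insert_insert_self,
        PySem.Dict.getD_of_not_contains t [] (by simpa using h)]

theorem pv_foldl_flatMap {α β γ : Type} (l : List α) (g : α → List β)
    (h : γ → β → γ) (init : γ) :
    l.foldl (fun acc x => (g x).foldl h acc) init = (l.flatMap g).foldl h init := by
  induction l generalizing init with
  | nil => rfl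
  | cons a l ih => simp [List.flatMap_cons, List.foldl_append, ih]

-- A's dict is the single fold of modify-append over the pair list
theorem pv_A_dict (graph : List (Int × List Int)) :
    graph.foldl
      (fun transposed p =>
        (PySem.List.pyRange 0 (p.2.length : Int) 1).foldl
          (fun t k =>
            (if t.contains (PySem.List.pyGetD p.2 k 0) then t
             else t.insert (PySem.List.pyGetD p.2 k 0) ([] : List Int)).modify
              (PySem.List.pyGetD p.2 k 0) [] (fun l => l ++ [p.1]))
          transposed)
      (PySem.Dict.empty : PySem.Dict Int (List Int))
      = (pvPairs graph).foldl (fun d q => d.modify q.1 [] (fun l => l ++ [q.2]))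
          PySem.Dict.empty := by
  rw [pvPairs, ← pv_foldl_flatMap]
  apply PySem.List.foldl_congr_mem
  intro acc p _
  rw [List.foldl_map,
      PySem.List.foldl_pyRange_pyGetD'
        (f := fun t e => (if t.contains e then t else t.insert e ([] : List Int)).modify
          e [] (fun l => l ++ [p.1])) (a := 0) (xs := p.2) (d := 0) (init := acc) le_rfl]
  simp only [Int.toNat_zero, List.drop_zero]
  apply PySem.List.foldl_congr_mem
  intro acc e _
  exact pv_inner_step acc e p.1

theorem pv_dests_gen (graph : List (Int × List Int)) (s : PySem.Set Int) :
    graph.foldl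
      (fun dests p =>
        p.2.foldl (fun ds e => if ds.contains e then ds else ds ++ [e]) dests) s
      = PySem.Set.update s (graph.flatMap (fun p => p.2)) := by
  induction graph generalizing s with
  | nil => rw [List.foldl_nil, List.flatMap_nil, PySem.Set.update_nil]
  | cons p rest ih =>
    rw [List.foldl_cons, ih, List.flatMap_cons, PySem.Set.update_append]
    congr 1


theorem pv_dests_eq (graph : List (Int × List Int)) :
    pvDests graph = PySem.Set.ofList (graph.flatMap (fun p => p.2)) := by
  rw [pvDests, ← PySem.Set.update_nil_left]
  exact pv_dests_gen graph []

theorem pv_pairs_fst (graph : List (Int × List Int)) :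
    (pvPairs graph).map (·.1) = graph.flatMap (fun p => p.2) := by
  simp [pvPairs, List.map_flatMap, Function.comp_def]

theorem pv_collect_eq (graph : List (Int × List Int)) (d : Int) :
    ((pvPairs graph).filter (fun q => q.1 == d)).map (·.2) = pvCollect graph d := by
  simp only [pvPairs, pvCollect, List.filter_flatMap, List.map_flatMap,
    List.filter_map, List.map_map]
  rfl

-- ===== VERDICT (by name: the statement is the Claim_ definition above) =====
theorem graph_transpose_spec : Claim_equal_graph_transpose := by
  intro graph _
  show graph_transpose graph = graph_transpose_alt graph
  rw [graph_transpose, pv_A_dict]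
  set D := (pvPairs graph).foldl (fun d q => d.modify q.1 [] (fun l => l ++ [q.2]))
      PySem.Dict.empty with hD
  have hkeys : D.keys = pvDests graph := by
    rw [hD, PySem.Dict.keys_foldl_modify_key (key := Prod.fst)
          (f := fun d q => fun l => l ++ [q.2]),
        PySem.Dict.keys_empty, PySem.Set.update_nil_left, pv_pairs_fst, pv_dests_eq]
  have hnodup : D.keys.Nodup := by
    rw [hkeys, pv_dests_eq]; exact PySem.Set.nodup_ofList _
  have hval : ∀ c, D.getD c [] = pvCollect graph c := by
    intro c
    rw [hD, PySem.Dict.getD_foldl_modify_append, PySem.Dict.getD_empty,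
        List.nil_append, pv_collect_eq]
  rw [PySem.Dict.items_eq_map_keys D hnodup [], hkeys, graph_transpose_alt]
  exact List.map_congr_left (fun d _ => by rw [hval d])
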